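-- pv_equiv track=rewrite | github.com/SamLolo/Alto | Classes/Utils.py | format_artists
-- ===== SOURCE A (Python) =====
-- def format_artists(artists: list):
--
--     # Add comma up until 2nd to last artist in list, using & between the last 2 artists
--     formatted = ""
--     for index, artist in enumerate(artists):
--         if index > 0 and index < len(artists)-1:
--             formatted += ", "
--         elif index == len(artists)-1 and index != 0:
--             formatted += " & "
--
--         # Format string based on whether links are available
--         if 'id' in artist.keys() and artist['id'] is not None:
--             formatted += f"[{artist['name']}](https://open.spotify.com/artist/{artist['id']})"
--         else:
--             formatted += artist['name']
--     return formatted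
-- ===== SOURCE B (Python) =====
-- def format_artists(artists: list):
--     # Build one formatted piece per artist, then assemble with ", " / " & ".
--     def piece(artist):
--         if 'id' in artist.keys() and artist['id'] is not None:
--             return f"[{artist['name']}](https://open.spotify.com/artist/{artist['id']})"
--         return artist['name']
--
--     pieces = [piece(a) for a in artists]
--     if not pieces:
--         return ""
--     if len(pieces) == 1:
--         return pieces[0]
--     return ", ".join(pieces[:-1]) + " & " + pieces[-1]
-- ===== Notes on version B (the rewrite author's own statement) =====
-- stated objective: simpler
-- what changed: Replaces the in-loop index-based delimiter branching with a precomputed list of per-artist pieces assembled by a single join over all but the last piece plus ' & ' plus the last piece.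
import Mathlib
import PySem

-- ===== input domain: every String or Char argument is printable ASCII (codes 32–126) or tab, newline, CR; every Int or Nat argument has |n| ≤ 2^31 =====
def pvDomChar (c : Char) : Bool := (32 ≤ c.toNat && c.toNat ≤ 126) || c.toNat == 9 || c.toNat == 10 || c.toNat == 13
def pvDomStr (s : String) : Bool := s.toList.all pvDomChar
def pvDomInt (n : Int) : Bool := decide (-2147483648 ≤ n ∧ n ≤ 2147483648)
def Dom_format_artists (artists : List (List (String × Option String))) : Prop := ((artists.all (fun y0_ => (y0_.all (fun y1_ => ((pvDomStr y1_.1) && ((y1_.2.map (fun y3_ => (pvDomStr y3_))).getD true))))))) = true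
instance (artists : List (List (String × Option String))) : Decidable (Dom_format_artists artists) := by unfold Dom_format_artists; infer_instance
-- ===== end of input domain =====

-- B restructures A: per-artist pieces are built first, then assembled with one join over all but the last piece plus " & " plus the last; same return value on Pre_.

-- ===== PORT A =====
-- artist['name'] rendered through an f-string: None prints as "None" (reachable inside Pre_ only in the link branch).
def pvShowName (o : Option (Option String)) : String :=
  match o with
  | some (some s) => s
  | some none => "None"   -- f"{None}" = "None"
  | none => ""            -- KeyError in Python; excluded by Pre_format_artists

-- loop body of A, with n = len(artists) captured
def pvStepA (n : Int) (formatted : String) (p : Int × List (String × Option String)) : String :=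
  let formatted :=
    if p.1 > 0 ∧ p.1 < n - 1 then formatted ++ ", "
    else if p.1 = n - 1 ∧ p.1 ≠ 0 then formatted ++ " & " else formatted
  match p.2.lookup "id" with
  | some (some i) => formatted ++ "[" ++ pvShowName (p.2.lookup "name") ++ "](https://open.spotify.com/artist/" ++ i ++ ")"
  | _ => formatted ++ pvShowName (p.2.lookup "name")

def format_artists (artists : List (List (String × Option String))) : String :=
  (PySem.List.enumerate artists).foldl (pvStepA (artists.length : Int)) ""

-- ===== PORT B =====
def pvPieceB (a : List (String × Option String)) : String :=
  match a.lookup "id" with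
  | some (some i) => "[" ++ pvShowName (a.lookup "name") ++ "](https://open.spotify.com/artist/" ++ i ++ ")"
  | _ => pvShowName (a.lookup "name")

def format_artists_alt (artists : List (List (String × Option String))) : String :=
  match artists.map pvPieceB with
  | [] => ""
  | [p] => p
  | p :: q :: rest =>
      -- ", ".join(pieces[:-1]) + " & " + pieces[-1]
      PySem.Str.join ", " (PySem.List.slice (p :: q :: rest) none (some (-1))) ++ " & "
        ++ PySem.List.pyGetD (p :: q :: rest) (-1) ""

-- ===== PRECONDITION & SPEC =====
-- Pre_ excludes exactly the inputs on which A raises: an artist without a 'name' key (KeyError),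
-- or an artist whose 'name' is None while it has no non-None 'id' (TypeError on str += None).
def Pre_format_artists (artists : List (List (String × Option String))) : Prop :=
  ∀ a ∈ artists,
    ((a.lookup "name").join.isSome
      || ((a.lookup "name" == some none) && (a.lookup "id").join.isSome)) = true
instance (artists : List (List (String × Option String))) : Decidable (Pre_format_artists artists) := by unfold Pre_format_artists; infer_instance

def pvWitness_format_artists : (List (List (String × Option String))) :=
  [[("name", some "Artist A"), ("id", some "abc")], [("name", some "B")]]

def Spec_format_artists (artists : List (List (String × Option String))) (out : String) : Prop := out = format_artists_alt artists
instance (artists : List (List (String × Option String))) (out : String) : Decidable (Spec_format_artists artists out) := by unfold Spec_format_artists; infer_instance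

-- ===== CLAIM (what is proved, stated in full; the proofs are below) =====
def Claim_equal_format_artists : Prop := ∀ (artists : List (List (String × Option String))), Dom_format_artists artists → Pre_format_artists artists → Spec_format_artists artists (format_artists artists)

-- ===== LEMMAS AND PROOFS =====

-- the tail of the assembled string after the first piece
def pvTailAsm : List String → String
  | [] => ""
  | [p] => " & " ++ p
  | p :: q :: rest => ", " ++ p ++ pvTailAsm (q :: rest)

theorem pvStrJoin_cons_cons (sep x y : String) (rest : List String) :
    PySem.Str.join sep (x :: y :: rest) = x ++ sep ++ PySem.Str.join sep (y :: rest) := by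
  rw [← String.toList_inj]
  simp [PySem.Chars.join_cons_cons]

theorem pvFoldA_char (l : List (List (String × Option String))) (s : Int) (acc : String)
    (hs : 1 ≤ s) :
    (PySem.List.enumerate l s).foldl (pvStepA (s + l.length)) acc
      = acc ++ pvTailAsm (l.map pvPieceB) := by
  induction l generalizing s acc with
  | nil => simp [PySem.List.enumerate_nil, pvTailAsm]
  | cons a l ih =>
    rw [PySem.List.enumerate_cons]
    simp only [List.foldl_cons]
    cases l with
    | nil =>
      simp only [PySem.List.enumerate_nil, List.foldl_nil, List.map, pvTailAsm]
      have h1 : ¬ (s > 0 ∧ s < s + (([a] : List (List (String × Option String))).length : Int) - 1) := by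
        simp
      have h2 : s = s + (([a] : List (List (String × Option String))).length : Int) - 1 ∧ s ≠ 0 := by
        refine ⟨by simp, by omega⟩
      simp only [pvStepA, if_neg h1, if_pos h2, pvPieceB]
      cases hid : a.lookup "id" with
      | none => rw [← String.toList_inj]; simp
      | some v => cases v <;> (rw [← String.toList_inj]; simp)
    | cons b l' =>
      have hlen : (s + 1) + ((b :: l').length : Int) = s + (((a :: b :: l') : List (List (String × Option String))).length : Int) := by
        simp; omega
      have h1 : s > 0 ∧ s < s + (((a :: b :: l') : List (List (String × Option String))).length : Int) - 1 := by
        refine ⟨by omega, by simp; omega⟩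
      rw [show (pvStepA (s + (((a :: b :: l') : List (List (String × Option String))).length : Int)) acc (s, a))
            = acc ++ (", " ++ pvPieceB a) from ?_, ← hlen, ih (s + 1) _ (by omega)]
      · simp [List.map, pvTailAsm, String.append_assoc]
      · simp only [pvStepA, if_pos h1, pvPieceB]
        cases hid : a.lookup "id" with
        | none => rw [← String.toList_inj]; simp
        | some v => cases v <;> (rw [← String.toList_inj]; simp)

theorem pvTailAsm_join (p : String) (rest : List String) (h : rest ≠ []) :
    p ++ pvTailAsm rest
      = PySem.Str.join ", " (PySem.List.slice (p :: rest) none (some (-1))) ++ " & "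
          ++ PySem.List.pyGetD (p :: rest) (-1) "" := by
  induction rest generalizing p with
  | nil => exact absurd rfl h
  | cons q rest' ih =>
    rw [PySem.List.slice_to_neg_one, PySem.List.pyGetD_neg_one (p :: q :: rest') "" (by simp)]
    cases rest' with
    | nil =>
      simp [pvTailAsm, PySem.Str.join, PySem.Chars.join, List.intercalate, ← String.append_assoc]
    | cons r rest'' =>
      have hthis := ih q (by simp)
      rw [PySem.List.slice_to_neg_one, PySem.List.pyGetD_neg_one (q :: r :: rest'') "" (by simp)] at hthis
      have hdl : (p :: q :: r :: rest'').dropLast = p :: q :: (r :: rest'').dropLast := by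
        simp [List.dropLast]
      have hdl2 : (q :: r :: rest'').dropLast = q :: (r :: rest'').dropLast := by
        simp [List.dropLast]
      have hgl : (p :: q :: r :: rest'').getLast (by simp) = (q :: r :: rest'').getLast (by simp) := by
        simp [List.getLast]
      rw [hdl, hgl, pvStrJoin_cons_cons, ← hdl2]
      rw [show pvTailAsm (q :: r :: rest'') = ", " ++ (q ++ pvTailAsm (r :: rest'')) from by
            rw [pvTailAsm, String.append_assoc], hthis]
      simp [← String.append_assoc]

-- ===== VERDICT (by name: the statement is the Claim_ definition above) =====
theorem format_artists_spec : Claim_equal_format_artists := by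
  intro artists _ _
  unfold Spec_format_artists format_artists format_artists_alt
  cases artists with
  | nil => simp [PySem.List.enumerate_nil]
  | cons a rest =>
    cases rest with
    | nil =>
      simp only [PySem.List.enumerate_cons, PySem.List.enumerate_nil, List.foldl,
        List.map_cons, List.map_nil]
      simp [pvStepA, pvPieceB]
    | cons b rest' =>
      rw [PySem.List.enumerate_cons, List.foldl_cons, show (0:Int) + 1 = 1 from rfl]
      have hlen : (((a :: b :: rest') : List (List (String × Option String))).length : Int)
          = 1 + ((b :: rest').length : Int) := by simp; omega
      rw [hlen, pvFoldA_char (b :: rest') 1 _ (le_refl 1)]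
      have hstep : pvStepA (1 + ((b :: rest').length : Int)) "" (0, a) = pvPieceB a := by
        have h1 : ¬ ((0:Int) > 0 ∧ (0:Int) < 1 + ((b :: rest').length : Int) - 1) := by
          simp
        have h2 : ¬ ((0:Int) = 1 + ((b :: rest').length : Int) - 1 ∧ (0:Int) ≠ 0) := by
          simp
        simp only [pvStepA, if_neg h1, if_neg h2, pvPieceB]
        cases hid : a.lookup "id" with
        | none => simp
        | some v => cases v <;> simp
      rw [hstep, List.map_cons, List.map_cons]
      exact pvTailAsm_join (pvPieceB a) (pvPieceB b :: rest'.map pvPieceB) (by simp)
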